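-- pv_equiv track=rewrite | github.com/bakuganin/primefist-news-bot | primefist_bot.py | compact_multiline
-- ===== SOURCE A (Python) =====
-- def clean_text(value: str | None) -> str:
--     if not value:
--         return ""
--     return " ".join(value.split())
--
-- def compact_multiline(text: str, max_len: int) -> str:
--     lines = []
--     previous_blank = False
--     for raw_line in (text or "").splitlines():
--         line = clean_text(raw_line)
--         if line:
--             lines.append(line)
--             previous_blank = False
--         elif lines and not previous_blank:
--             lines.append("")
--             previous_blank = True
--     while lines and not lines[-1]:
--         lines.pop()
--
--     text = "\n".join(lines).strip()
--     if len(text) <= max_len: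
--         return text
--     trimmed = text[:max_len].rsplit(" ", 1)[0].rstrip(".,;: ")
--     return f"{trimmed}..."
-- ===== SOURCE B (Python) =====
-- import re
--
-- def compact_multiline(text, max_len):
--     joined = "\n".join(" ".join(l.split()) for l in (text or "").splitlines())
--     out = re.sub(r"\n{2,}", "\n\n", joined).strip()
--     if len(out) <= max_len:
--         return out
--     trimmed = out[:max_len].rsplit(" ", 1)[0].rstrip(".,;: ")
--     return trimmed + "..."
-- ===== Notes on version B (the rewrite author's own statement) =====
-- stated objective: simpler
-- what changed: Replaces A's one-pass line state machine (previous_blank flag, inserted "" separator entries, trailing-pop while loop) by staged whole-string normalization: join the cleaned lines with newlines, collapse every run of 2+ newlines to exactly two with one regex substitution, then strip; the truncation tail is unchanged.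
import Mathlib
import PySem

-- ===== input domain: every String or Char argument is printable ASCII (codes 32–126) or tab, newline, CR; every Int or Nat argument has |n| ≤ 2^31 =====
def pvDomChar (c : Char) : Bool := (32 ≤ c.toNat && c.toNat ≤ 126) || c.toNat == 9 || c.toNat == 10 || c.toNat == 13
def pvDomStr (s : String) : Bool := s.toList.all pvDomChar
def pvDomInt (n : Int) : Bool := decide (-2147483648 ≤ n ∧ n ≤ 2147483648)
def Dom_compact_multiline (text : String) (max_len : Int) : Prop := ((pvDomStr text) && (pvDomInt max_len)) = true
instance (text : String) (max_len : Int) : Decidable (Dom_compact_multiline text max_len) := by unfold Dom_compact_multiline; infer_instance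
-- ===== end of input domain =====

-- B replaces A's stateful previous_blank/append-""/trailing-pop/strip line loop by staged whole-string
-- normalization: join the cleaned lines, collapse every newline run of length ≥ 2 to exactly two
-- (re.sub(r"\n{2,}", "\n\n", ·)), then strip (simpler decomposition; the truncation tail is unchanged).

-- helpers shared by both ports: the truncation tail is the SAME code in both Pythons
-- cs.rsplit(" ", 1)[0] — hand port (PySem has no rsplit): the part before the LAST space, or all of cs; exact
def pvRsplitLast1Head (cs : List Char) : List Char :=
  let i := PySem.Chars.rfind cs [' ']
  if i = -1 then cs else cs.take i.toNat
-- cs.rstrip(".,;: ") — hand port (PySem has no rstrip-with-chars): drop those chars from the right; exact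
def pvRstripPunct (cs : List Char) : List Char :=
  (cs.reverse.dropWhile (fun c => c = '.' ∨ c = ',' ∨ c = ';' ∨ c = ':' ∨ c = ' ')).reverse
-- the common tail:  if len(t) <= max_len: return t ; trimmed = t[:max_len].rsplit(" ",1)[0].rstrip(".,;: "); return trimmed + "..."
def pvTail (t : List Char) (max_len : Int) : String :=
  if (t.length : Int) ≤ max_len then String.ofList t
  else String.ofList (pvRstripPunct (pvRsplitLast1Head (PySem.List.slice t none (some max_len))) ++ ['.', '.', '.'])

-- ===== PORT A =====
-- clean_text(value): if not value: return ""   else " ".join(value.split())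
def pvCleanText (value : List Char) : List Char :=
  if value = [] then [] else PySem.Chars.join [' '] (PySem.Chars.split₀ value)
-- one iteration of A's loop body, applied to the cleaned line (state = (lines, previous_blank))
def pvStepA (st : List (List Char) × Bool) (line : List Char) : List (List Char) × Bool :=
  if line ≠ [] then (st.1 ++ [line], false)
  else if st.1 ≠ [] ∧ st.2 = false then (st.1 ++ [[]], true)
  else st
-- while lines and not lines[-1]: lines.pop()
def pvPopTrailing (ls : List (List Char)) : List (List Char) :=
  (ls.reverse.dropWhile (fun l => l.isEmpty)).reverse

def compact_multiline (text : String) (max_len : Int) : String :=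
  pvTail (PySem.Chars.strip (PySem.Chars.join ['\n'] (pvPopTrailing
    (((PySem.Chars.splitlines (if text.toList = [] then [] else text.toList)).foldl
        (fun st raw => pvStepA st (pvCleanText raw)) ([], false)).1)))) max_len

-- ===== PORT B =====
-- re.sub(r"\n{2,}", "\n\n", s) — hand port (PySem has no regex): replacing every maximal run of
-- 2 or more '\n' by exactly two '\n' = keeping at most the first two '\n' of each run; the
-- counter k is the number of consecutive '\n' already seen; exact on all inputs
def pvCollapseRun (k : Nat) : List Char → List Char
  | [] => []
  | c :: t =>
    if c = '\n' then
      (if 2 ≤ k then pvCollapseRun (k + 1) t else '\n' :: pvCollapseRun (k + 1) t)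
    else c :: pvCollapseRun 0 t

def pvCollapseNN (s : List Char) : List Char := pvCollapseRun 0 s

def compact_multiline_alt (text : String) (max_len : Int) : String :=
  pvTail (PySem.Chars.strip (pvCollapseNN (PySem.Chars.join ['\n']
    ((PySem.Chars.splitlines (if text.toList = [] then [] else text.toList)).map
      (fun l => PySem.Chars.join [' '] (PySem.Chars.split₀ l)))))) max_len

-- ===== PRECONDITION & SPEC =====
def Spec_compact_multiline (text : String) (max_len : Int) (out : String) : Prop := out = compact_multiline_alt text max_len
instance (text : String) (max_len : Int) (out : String) : Decidable (Spec_compact_multiline text max_len out) := by unfold Spec_compact_multiline; infer_instance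

-- ===== CLAIM (what is proved, stated in full; the proofs are below) =====
def Claim_equal_compact_multiline : Prop := ∀ (text : String) (max_len : Int), Dom_compact_multiline text max_len → Spec_compact_multiline text max_len (compact_multiline text max_len)

-- ===== LEMMAS AND PROOFS =====

-- proof device: blank-separated grouping of the cleaned lines; both ports' cores are reduced to it
def pvStepB (st : List (List (List Char)) × List (List Char)) (l : List Char) :
    List (List (List Char)) × List (List Char) :=
  if l ≠ [] then (st.1, st.2 ++ [l])
  else if st.2 ≠ [] then (st.1 ++ [st.2], []) else st

def pvF (cl : List (List Char)) : List (List (List Char)) :=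
  if (cl.foldl pvStepB ([], [])).2 ≠ []
    then (cl.foldl pvStepB ([], [])).1 ++ [(cl.foldl pvStepB ([], [])).2]
    else (cl.foldl pvStepB ([], [])).1

-- "clean": no leading and no trailing whitespace
def pvClean (cs : List Char) : Prop :=
  PySem.Chars.lstrip cs = cs ∧ PySem.Chars.rstrip cs = cs
-- no newline character
def pvNoNL (cs : List Char) : Prop := '\n' ∉ cs
-- adjacency relation: a newline is never followed by a newline
def pvR (a b : Char) : Prop := a = '\n' → b ≠ '\n'
-- the lines list corresponding to a groups list: blocks separated by one blank line
def pvInter : List (List (List Char)) → List (List Char)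
  | [] => []
  | [g] => g
  | g :: g' :: t => g ++ [[]] ++ pvInter (g' :: t)
-- the coupling invariant between A's (lines, previous_blank) and the grouping fold's (groups, cur)
def pvInv (lines : List (List Char)) (flag : Bool)
    (gs : List (List (List Char))) (cur : List (List Char)) : Prop :=
  (∀ g ∈ gs, g ≠ [] ∧ ∀ x ∈ g, x ≠ [] ∧ pvClean x) ∧
  (∀ x ∈ cur, x ≠ [] ∧ pvClean x) ∧
  (flag = true → cur = [] ∧ gs ≠ [] ∧ lines = pvInter gs ++ [[]]) ∧
  (flag = false → (cur = [] → gs = [] ∧ lines = []) ∧ (cur ≠ [] → lines = pvInter (gs ++ [cur])))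

lemma lstrip_of_no_space (l : List Char) (h : ∀ c ∈ l, PySem.Chars.isspace c = false) :
    PySem.Chars.lstrip l = l := by
  cases l with
  | nil => rfl
  | cons c t => simp [PySem.Chars.lstrip, List.dropWhile, h c (by simp)]

lemma rstrip_of_no_space (l : List Char) (h : ∀ c ∈ l, PySem.Chars.isspace c = false) :
    PySem.Chars.rstrip l = l := by
  unfold PySem.Chars.rstrip
  rw [List.dropWhile_eq_self_iff.mpr, List.reverse_reverse]
  intro hl hp
  have : l.reverse[0] ∈ l := by rw [← List.mem_reverse]; exact List.getElem_mem hl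
  rw [h _ this] at hp; exact Bool.noConfusion hp

lemma clean_head_not_space (c : Char) (t : List Char) (h : PySem.Chars.lstrip (c :: t) = c :: t) :
    PySem.Chars.isspace c = false := by
  unfold PySem.Chars.lstrip at h
  by_contra hb
  rw [List.dropWhile_cons_of_pos (by simp at hb ⊢; exact hb)] at h
  have := congrArg List.length h
  simp at this
  have := List.length_dropWhile_le (p := PySem.Chars.isspace) t
  omega

lemma lstrip_append (l u : List Char) (hne : l ≠ []) (hl : PySem.Chars.lstrip l = l) :
    PySem.Chars.lstrip (l ++ u) = l ++ u := by
  cases l with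
  | nil => exact absurd rfl hne
  | cons c t =>
    have hc := clean_head_not_space c t hl
    unfold PySem.Chars.lstrip
    simp [hc]

lemma rstrip_append (l u : List Char) (hne : u ≠ []) (hu : PySem.Chars.rstrip u = u) :
    PySem.Chars.rstrip (l ++ u) = l ++ u := by
  unfold PySem.Chars.rstrip at *
  have hu' : List.dropWhile PySem.Chars.isspace u.reverse = u.reverse := by
    have := congrArg List.reverse hu
    simpa using this
  cases hr : u.reverse with
  | nil => simp at hr; exact absurd hr hne
  | cons c t =>
    rw [hr] at hu'
    have hc : PySem.Chars.isspace c = false := by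
      by_contra hb
      rw [List.dropWhile_cons_of_pos (by simp at hb ⊢; exact hb)] at hu'
      have := congrArg List.length hu'
      simp at this
      have := List.length_dropWhile_le (p := PySem.Chars.isspace) t
      omega
    rw [List.reverse_append, hr]
    simp only [List.cons_append, List.dropWhile_cons, hc]
    simp [← List.cons_append, ← hr]

lemma join_ne_nil (sep : List Char) (ls : List (List Char)) (hne : ls ≠ [])
    (h : ∀ l ∈ ls, l ≠ []) : PySem.Chars.join sep ls ≠ [] := by
  cases ls with
  | nil => exact absurd rfl hne
  | cons t rest =>
    cases rest with
    | nil => rw [PySem.Chars.join_singleton]; exact h t (by simp)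
    | cons r rs =>
      rw [PySem.Chars.join_cons_cons]
      have := h t (by simp)
      simp [this]

lemma join_append (sep : List Char) (xs ys : List (List Char)) (hx : xs ≠ []) (hy : ys ≠ []) :
    PySem.Chars.join sep (xs ++ ys) = PySem.Chars.join sep xs ++ sep ++ PySem.Chars.join sep ys := by
  induction xs with
  | nil => exact absurd rfl hx
  | cons x xs ih =>
    cases xs with
    | nil =>
      cases ys with
      | nil => exact absurd rfl hy
      | cons y ys' => simp [PySem.Chars.join_cons_cons, PySem.Chars.join_singleton]
    | cons x' xs' =>
      rw [List.cons_append, List.cons_append, PySem.Chars.join_cons_cons,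
        PySem.Chars.join_cons_cons, ← List.cons_append, ih (by simp)]
      simp

lemma pvInter_ne_nil (gs : List (List (List Char))) (hne : gs ≠ [])
    (h : ∀ g ∈ gs, g ≠ []) : pvInter gs ≠ [] := by
  cases gs with
  | nil => exact absurd rfl hne
  | cons g t =>
    cases t with
    | nil => exact h g (by simp)
    | cons g' t' => simp [pvInter, h g (by simp)]

lemma pvInter_append_singleton (gs : List (List (List Char))) (c : List (List Char)) (hne : gs ≠ []) :
    pvInter (gs ++ [c]) = pvInter gs ++ [[]] ++ c := by
  induction gs with
  | nil => exact absurd rfl hne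
  | cons g t ih =>
    cases t with
    | nil => simp [pvInter]
    | cons g' t' =>
      rw [List.cons_append, List.cons_append]
      show pvInter (g :: g' :: (t' ++ [c])) = _
      rw [pvInter, pvInter, ← List.cons_append, ih (by simp)]
      simp

lemma pvInter_snoc_elem (gs : List (List (List Char))) (c : List (List Char)) (x : List Char) :
    pvInter (gs ++ [c ++ [x]]) = pvInter (gs ++ [c]) ++ [x] := by
  cases gs with
  | nil => simp [pvInter]
  | cons g t =>
    rw [pvInter_append_singleton _ _ (by simp), pvInter_append_singleton _ _ (by simp)]
    simp

lemma pvInter_last (gs : List (List (List Char))) (hne : gs ≠ [])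
    (h : ∀ g ∈ gs, g ≠ [] ∧ ∀ x ∈ g, x ≠ []) :
    ∃ xs y, pvInter gs = xs ++ [y] ∧ y ≠ ([] : List Char) := by
  induction gs with
  | nil => exact absurd rfl hne
  | cons g t ih =>
    cases t with
    | nil =>
      obtain ⟨hg, hx⟩ := h g (by simp)
      refine ⟨g.dropLast, g.getLast hg, ?_, hx _ (List.getLast_mem hg)⟩
      simp [pvInter, List.dropLast_append_getLast hg]
    | cons g' t' =>
      obtain ⟨xs, y, he, hy⟩ := ih (by simp) (fun a ha => h a (by simp [ha]))
      exact ⟨g ++ [[]] ++ xs, y, by rw [pvInter, he]; simp, hy⟩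

lemma popTrailing_snoc (xs : List (List Char)) (y : List Char) (hy : y ≠ []) :
    pvPopTrailing (xs ++ [y]) = xs ++ [y] := by
  unfold pvPopTrailing
  rw [List.reverse_append]
  simp only [List.reverse_cons, List.reverse_nil, List.nil_append, List.cons_append,
    List.dropWhile_cons]
  simp [List.isEmpty_iff, hy]

lemma popTrailing_snoc_nil (xs : List (List Char)) (y : List Char) (hy : y ≠ []) :
    pvPopTrailing ((xs ++ [y]) ++ [[]]) = xs ++ [y] := by
  unfold pvPopTrailing
  rw [List.reverse_append, List.reverse_append]
  simp only [List.reverse_cons, List.reverse_nil, List.nil_append, List.cons_append,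
    List.dropWhile_cons]
  simp [List.isEmpty_iff, hy]

lemma clean_join (sep : List Char) (ls : List (List Char))
    (h : ∀ l ∈ ls, l ≠ [] ∧ pvClean l) : pvClean (PySem.Chars.join sep ls) := by
  induction ls with
  | nil => exact ⟨rfl, rfl⟩
  | cons t rest ih =>
    obtain ⟨ht, hlt, hrt⟩ := h t (by simp)
    cases rest with
    | nil => rw [PySem.Chars.join_singleton]; exact ⟨hlt, hrt⟩
    | cons r rs =>
      have hrest : ∀ l ∈ r :: rs, l ≠ [] ∧ pvClean l := fun l hl => h l (by simp [hl])
      obtain ⟨hlj, hrj⟩ := ih hrest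
      have hjne : PySem.Chars.join sep (r :: rs) ≠ [] :=
        join_ne_nil sep _ (by simp) (fun l hl => (hrest l hl).1)
      rw [PySem.Chars.join_cons_cons]
      constructor
      · rw [List.append_assoc]; exact lstrip_append _ _ ht hlt
      · exact rstrip_append _ _ hjne hrj

lemma clean_strip (cs : List Char) (h : pvClean cs) : PySem.Chars.strip cs = cs := by
  unfold PySem.Chars.strip
  rw [h.1, h.2]

lemma split₀_go_tok (s : List Char) : ∀ (cur : List Char) (acc : List (List Char)),
    (∀ c ∈ cur, PySem.Chars.isspace c = false) →
    (∀ t ∈ acc, t ≠ [] ∧ ∀ c ∈ t, PySem.Chars.isspace c = false) →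
    ∀ t ∈ PySem.Chars.split₀.go s cur acc, t ≠ [] ∧ ∀ c ∈ t, PySem.Chars.isspace c = false := by
  induction s with
  | nil =>
    intro cur acc hc ha t ht
    rw [PySem.Chars.split₀.go] at ht
    by_cases h : cur.isEmpty
    · simp [h] at ht; exact ha t (by simpa using ht)
    · simp [h] at ht
      rcases ht with hm | rfl
      · exact ha t hm
      · refine ⟨by simpa [List.isEmpty_iff] using h, ?_⟩
        intro c hcm; exact hc c (by simpa using hcm)
  | cons a s ih =>
    intro cur acc hc ha t ht
    rw [PySem.Chars.split₀.go] at ht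
    by_cases hsp : PySem.Chars.isspace a
    · simp only [hsp, if_pos] at ht
      by_cases hce : cur.isEmpty
      · simp only [hce, if_pos] at ht
        exact ih [] acc (by simp) ha t ht
      · simp only [hce, if_neg, Bool.false_eq_true, not_false_iff] at ht
        refine ih [] _ (by simp) ?_ t ht
        intro u hu
        rcases List.mem_cons.mp hu with rfl | hm
        · refine ⟨by simpa [List.isEmpty_iff] using hce, ?_⟩
          intro c hcm; exact hc c (by simpa using hcm)
        · exact ha u hm
    · simp only [hsp, if_neg, Bool.false_eq_true, not_false_iff] at ht
      refine ih (a :: cur) acc ?_ ha t ht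
      intro c hcm
      rcases List.mem_cons.mp hcm with rfl | hm
      · simpa using hsp
      · exact hc c hm

lemma mem_join (sep : List Char) (ls : List (List Char)) (c : Char)
    (h : c ∈ PySem.Chars.join sep ls) : c ∈ sep ∨ ∃ l ∈ ls, c ∈ l := by
  induction ls with
  | nil => rw [PySem.Chars.join_nil] at h; exact absurd h (by simp)
  | cons t rest ih =>
    cases rest with
    | nil => rw [PySem.Chars.join_singleton] at h; exact Or.inr ⟨t, by simp, h⟩
    | cons r rs =>
      rw [PySem.Chars.join_cons_cons] at h
      rcases List.mem_append.mp h with h1 | h1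
      · rcases List.mem_append.mp h1 with h2 | h2
        · exact Or.inr ⟨t, by simp, h2⟩
        · exact Or.inl h2
      · rcases ih h1 with h2 | ⟨l, hl, hcl⟩
        · exact Or.inl h2
        · exact Or.inr ⟨l, by simp [hl], hcl⟩

lemma join_inter (gs : List (List (List Char))) (h : ∀ g ∈ gs, g ≠ []) :
    PySem.Chars.join ['\n'] (pvInter gs)
      = PySem.Chars.join ['\n', '\n'] (gs.map (fun g => PySem.Chars.join ['\n'] g)) := by
  induction gs with
  | nil => rfl
  | cons g t ih =>
    cases t with
    | nil => simp [pvInter, PySem.Chars.join_singleton]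
    | cons g' t' =>
      have hI : pvInter (g' :: t') ≠ [] :=
        pvInter_ne_nil _ (by simp) (fun a ha => h a (by simp [ha]))
      rw [pvInter]
      rw [List.append_assoc]
      rw [join_append _ g _ (h g (by simp)) (by simp)]
      rw [List.map_cons, List.map_cons]
      rw [PySem.Chars.join_cons_cons]
      obtain ⟨i, I, hII⟩ : ∃ i I, pvInter (g' :: t') = i :: I := by
        cases hI' : pvInter (g' :: t') with
        | nil => exact absurd hI' hI
        | cons i I => exact ⟨i, I, rfl⟩
      rw [hII]
      rw [List.singleton_append]
      rw [PySem.Chars.join_cons_cons]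
      rw [← hII]
      rw [ih (fun a ha => h a (by simp [ha]))]
      simp

lemma pvCleanText_eq (l : List Char) :
    pvCleanText l = PySem.Chars.join [' '] (PySem.Chars.split₀ l) := by
  unfold pvCleanText
  split_ifs with h
  · subst h; rfl
  · rfl

lemma clean_pvCleanText (l : List Char) : pvClean (pvCleanText l) := by
  rw [pvCleanText_eq]
  apply clean_join
  intro t ht
  have hspec := split₀_go_tok l [] [] (by simp) (by simp) t ht
  exact ⟨hspec.1, lstrip_of_no_space t hspec.2, rstrip_of_no_space t hspec.2⟩

lemma noNL_pvCleanText (l : List Char) : pvNoNL (pvCleanText l) := by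
  rw [pvCleanText_eq]
  intro hmem
  rcases mem_join _ _ _ hmem with h1 | ⟨t, ht, hct⟩
  · simp at h1
  · have hspec := split₀_go_tok l [] [] (by simp) (by simp) t ht
    have := hspec.2 '\n' hct
    simp [show PySem.Chars.isspace '\n' = true from by decide] at this

lemma inv_step (lines : List (List Char)) (flag : Bool) (gs : List (List (List Char)))
    (cur : List (List Char)) (l : List Char) (hcl : pvClean l) (hInv : pvInv lines flag gs cur) :
    pvInv (pvStepA (lines, flag) l).1 (pvStepA (lines, flag) l).2
      (pvStepB (gs, cur) l).1 (pvStepB (gs, cur) l).2 := by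
  obtain ⟨hgs, hcur, hT, hF⟩ := hInv
  by_cases hl : l = []
  · subst hl
    cases flag with
    | true =>
      obtain ⟨hc0, hgne, hle⟩ := hT rfl
      have hA : pvStepA (lines, true) [] = (lines, true) := by simp [pvStepA]
      have hB : pvStepB (gs, cur) [] = (gs, cur) := by simp [pvStepB, hc0]
      rw [hA, hB]
      exact ⟨hgs, hcur, hT, hF⟩
    | false =>
      by_cases hc : cur = []
      · subst hc
        obtain ⟨hg0, hl0⟩ := (hF rfl).1 rfl
        subst hg0; subst hl0
        have hA : pvStepA (([] : List (List Char)), false) [] = ([], false) := by simp [pvStepA]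
        have hB : pvStepB (([] : List (List (List Char))), []) [] = ([], []) := by simp [pvStepB]
        rw [hA, hB]
        exact ⟨hgs, hcur, hT, hF⟩
      · have hlin : lines = pvInter (gs ++ [cur]) := (hF rfl).2 hc
        have hlne : lines ≠ [] := by
          rw [hlin]
          exact pvInter_ne_nil _ (by simp) (by
            intro g hg
            rcases List.mem_append.mp hg with h1 | h1
            · exact (hgs g h1).1
            · simp at h1; subst h1; exact hc)
        have hA : pvStepA (lines, false) [] = (lines ++ [[]], true) := by
          simp [pvStepA, hlne]
        have hB : pvStepB (gs, cur) [] = (gs ++ [cur], []) := by simp [pvStepB, hc]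
        rw [hA, hB]
        refine ⟨?_, by simp, fun _ => ⟨rfl, by simp, by rw [hlin]⟩, by simp⟩
        intro g hg
        rcases List.mem_append.mp hg with h1 | h1
        · exact hgs g h1
        · simp at h1; subst h1; exact ⟨hc, hcur⟩
  · have hA : pvStepA (lines, flag) l = (lines ++ [l], false) := by simp [pvStepA, hl]
    have hB : pvStepB (gs, cur) l = (gs, cur ++ [l]) := by simp [pvStepB, hl]
    rw [hA, hB]
    refine ⟨hgs, ?_, by simp, ?_⟩
    · intro x hx
      rcases List.mem_append.mp hx with h1 | h1
      · exact hcur x h1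
      · simp at h1; subst h1; exact ⟨hl, hcl⟩
    · intro _
      refine ⟨by simp, fun _ => ?_⟩
      cases flag with
      | true =>
        obtain ⟨hc0, hgne, hle⟩ := hT rfl
        subst hc0
        rw [hle, pvInter_append_singleton _ _ hgne]
        simp
      | false =>
        by_cases hc : cur = []
        · subst hc
          obtain ⟨hg0, hl0⟩ := (hF rfl).1 rfl
          subst hg0; subst hl0
          simp [pvInter]
        · rw [(hF rfl).2 hc, pvInter_snoc_elem]

lemma couple (cl : List (List Char)) (hcl : ∀ l ∈ cl, pvClean l) :
    ∀ lines flag gs cur, pvInv lines flag gs cur →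
      pvInv (cl.foldl pvStepA (lines, flag)).1 (cl.foldl pvStepA (lines, flag)).2
        (cl.foldl pvStepB (gs, cur)).1 (cl.foldl pvStepB (gs, cur)).2 := by
  induction cl with
  | nil => intro lines flag gs cur h; exact h
  | cons l t ih =>
    intro lines flag gs cur h
    rw [List.foldl_cons, List.foldl_cons]
    have := inv_step lines flag gs cur l (hcl l (by simp)) h
    have h2 := ih (fun x hx => hcl x (by simp [hx]))
      (pvStepA (lines, flag) l).1 (pvStepA (lines, flag) l).2
      (pvStepB (gs, cur) l).1 (pvStepB (gs, cur) l).2 this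
    simpa using h2

-- A's core equals the "\n\n"-joined grouping of the cleaned lines
lemma main_eq (cl : List (List Char)) (hcl : ∀ l ∈ cl, pvClean l) :
    PySem.Chars.strip (PySem.Chars.join ['\n'] (pvPopTrailing (cl.foldl pvStepA ([], false)).1))
      = PySem.Chars.join ['\n', '\n'] ((pvF cl).map (fun g => PySem.Chars.join ['\n'] g)) := by
  unfold pvF
  have h0 : pvInv [] false [] [] := by
    refine ⟨by simp, by simp, by simp, fun _ => ⟨fun _ => ⟨rfl, rfl⟩, fun hc => absurd rfl hc⟩⟩
  have hInv := couple cl hcl [] false [] [] h0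
  set L := (cl.foldl pvStepA ([], false)).1 with hL
  set f := (cl.foldl pvStepA ([], false)).2 with hf
  set G := (cl.foldl pvStepB ([], [])).1 with hG
  set c := (cl.foldl pvStepB ([], [])).2 with hc
  obtain ⟨hgs, hcur, hT, hF⟩ := hInv
  have key : ∀ (gs' : List (List (List Char))), (∀ g ∈ gs', g ≠ [] ∧ ∀ x ∈ g, x ≠ [] ∧ pvClean x) →
      PySem.Chars.strip (PySem.Chars.join ['\n'] (pvInter gs'))
        = PySem.Chars.join ['\n', '\n'] (gs'.map (fun g => PySem.Chars.join ['\n'] g)) := by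
    intro gs' hgs'
    rw [join_inter gs' (fun g hg => (hgs' g hg).1)]
    apply clean_strip
    apply clean_join
    intro b hb
    obtain ⟨g, hg, rfl⟩ := List.mem_map.mp hb
    obtain ⟨hgne, hx⟩ := hgs' g hg
    exact ⟨join_ne_nil _ _ hgne (fun x hxm => (hx x hxm).1),
      clean_join _ _ (fun x hxm => ⟨(hx x hxm).1, (hx x hxm).2⟩)⟩
  rcases Bool.eq_false_or_eq_true f with hft | hft
  ·
    obtain ⟨hc0, hgne, hle⟩ := hT hft
    rw [hle, hc0]
    simp only [ne_eq, not_true_eq_false, if_false]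
    obtain ⟨xs, y, hxy, hy⟩ := pvInter_last G hgne
      (fun g hg => ⟨(hgs g hg).1, fun x hx => ((hgs g hg).2 x hx).1⟩)
    rw [hxy, popTrailing_snoc_nil xs y hy, ← hxy]
    exact key G hgs
  ·
    by_cases hcc : c = []
    · obtain ⟨hg0, hl0⟩ := (hF hft).1 hcc
      rw [hl0, hg0, hcc]
      simp only [ne_eq, not_true_eq_false, if_false]
      simp [pvPopTrailing, PySem.Chars.join_nil]
      rfl
    · have hlin : L = pvInter (G ++ [c]) := (hF hft).2 hcc
      have hall : ∀ g ∈ G ++ [c], g ≠ [] ∧ ∀ x ∈ g, x ≠ [] ∧ pvClean x := by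
        intro g hg
        rcases List.mem_append.mp hg with h1 | h1
        · exact hgs g h1
        · simp at h1; subst h1; exact ⟨hcc, hcur⟩
      obtain ⟨xs, y, hxy, hy⟩ := pvInter_last (G ++ [c]) (by simp)
        (fun g hg => ⟨(hall g hg).1, fun x hx => ((hall g hg).2 x hx).1⟩)
      rw [hlin, hxy, popTrailing_snoc xs y hy, ← hxy, if_pos hcc]
      exact key (G ++ [c]) hall

-- ===== B-side lemmas: the staged collapse/strip equals the grouping =====

lemma run_ne (j : Nat) (c : Char) (t : List Char) (hc : c ≠ '\n') :
    pvCollapseRun j (c :: t) = c :: pvCollapseRun 0 t := by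
  simp [pvCollapseRun, hc]

lemma run_head_ne (j : Nat) (v : List Char)
    (hv : v = [] ∨ ∃ c t, v = c :: t ∧ c ≠ '\n') :
    pvCollapseRun j v = pvCollapseRun 0 v := by
  rcases hv with rfl | ⟨c, t, rfl, hc⟩
  · rfl
  · rw [run_ne j c t hc, run_ne 0 c t hc]

lemma run_ge2 (k : Nat) : ∀ (j : Nat), 2 ≤ j → ∀ (v : List Char),
    pvCollapseRun j (List.replicate k '\n' ++ v) = pvCollapseRun (j + k) v := by
  induction k with
  | zero => intro j _ v; simp
  | succ k ihk =>
    intro j hj v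
    rw [List.replicate_succ, List.cons_append]
    have : pvCollapseRun j ('\n' :: (List.replicate k '\n' ++ v))
        = pvCollapseRun (j + 1) (List.replicate k '\n' ++ v) := by
      simp [pvCollapseRun, show 2 ≤ j from hj]
    rw [this, ihk (j + 1) (by omega) v]
    congr 1
    omega

lemma collapse_repl (k : Nat) (v : List Char)
    (hv : v = [] ∨ ∃ c t, v = c :: t ∧ c ≠ '\n') :
    pvCollapseNN (List.replicate k '\n' ++ v)
      = List.replicate (min k 2) '\n' ++ pvCollapseNN v := by
  unfold pvCollapseNN
  match k with
  | 0 => simp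
  | 1 =>
    rcases hv with rfl | ⟨c, t, rfl, hc⟩
    · simp [pvCollapseRun]
    · rw [List.replicate_one, List.singleton_append]
      rw [show pvCollapseRun 0 ('\n' :: c :: t) = '\n' :: pvCollapseRun 1 (c :: t) from by
        simp [pvCollapseRun]]
      rw [run_ne 1 c t hc, run_ne 0 c t hc]
      rfl
  | (k + 2) =>
    rw [List.replicate_succ, List.replicate_succ, List.cons_append, List.cons_append]
    rw [show pvCollapseRun 0 ('\n' :: '\n' :: (List.replicate k '\n' ++ v))
        = '\n' :: pvCollapseRun 1 ('\n' :: (List.replicate k '\n' ++ v)) from by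
      simp [pvCollapseRun]]
    rw [show pvCollapseRun 1 ('\n' :: (List.replicate k '\n' ++ v))
        = '\n' :: pvCollapseRun 2 (List.replicate k '\n' ++ v) from by
      simp [pvCollapseRun]]
    rw [run_ge2 k 2 (by omega) v, run_head_ne (2 + k) v hv]
    have : min (k + 2) 2 = 2 := by omega
    rw [this]
    rfl

lemma collapse_append (u : List Char) (s : List Char)
    (h1 : List.IsChain pvR u) (h2 : u.getLast? ≠ some '\n') :
    pvCollapseNN (u ++ s) = u ++ pvCollapseNN s := by
  unfold pvCollapseNN
  induction u with
  | nil => simp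
  | cons c u' ih =>
    cases u' with
    | nil =>
      have hc : c ≠ '\n' := by simpa using h2
      rw [List.singleton_append, run_ne 0 c s hc]
      rfl
    | cons d t =>
      have h12 := List.isChain_cons_cons.mp h1
      have h2' : (d :: t).getLast? ≠ some '\n' := by rwa [List.getLast?_cons_cons] at h2
      by_cases hc : c = '\n'
      · have hd : d ≠ '\n' := h12.1 hc
        subst hc
        have hrec := ih h12.2 h2'
        rw [show (('\n' :: d :: t) ++ s) = '\n' :: ((d :: t) ++ s) from by simp]
        rw [show pvCollapseRun 0 ('\n' :: ((d :: t) ++ s))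
            = '\n' :: pvCollapseRun 1 ((d :: t) ++ s) from by simp [pvCollapseRun]]
        rw [List.cons_append, run_ne 1 d (t ++ s) hd]
        simp only [List.cons_append] at hrec ⊢
        rw [run_ne 0 d (t ++ s) hd] at hrec
        rw [hrec]
      · rw [List.cons_append, run_ne 0 c ((d :: t) ++ s) hc]
        rw [ih h12.2 h2']
        rfl

lemma lstrip_cons_ne (c : Char) (t : List Char) (h : PySem.Chars.isspace c = false) :
    PySem.Chars.lstrip (c :: t) = c :: t := by
  unfold PySem.Chars.lstrip
  simp [h]

lemma dropWhile_repl {a : Char} (p : Char → Bool) (hp : p a = true) (k : Nat) (v : List Char) :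
    List.dropWhile p (List.replicate k a ++ v) = List.dropWhile p v := by
  induction k with
  | zero => simp
  | succ k ihk => rw [List.replicate_succ, List.cons_append, List.dropWhile_cons, if_pos hp, ihk]

lemma lstrip_repl (k : Nat) (u : List Char) :
    PySem.Chars.lstrip (List.replicate k '\n' ++ u) = PySem.Chars.lstrip u := by
  unfold PySem.Chars.lstrip
  exact dropWhile_repl PySem.Chars.isspace (by decide) k u

lemma strip_repl_prefix (k : Nat) (u : List Char) :
    PySem.Chars.strip (List.replicate k '\n' ++ u) = PySem.Chars.strip u := by
  unfold PySem.Chars.strip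
  rw [lstrip_repl]

lemma strip_repl (k : Nat) : PySem.Chars.strip (List.replicate k '\n') = [] := by
  rw [← List.append_nil (List.replicate k '\n'), strip_repl_prefix]
  simp [PySem.Chars.strip, PySem.Chars.lstrip, PySem.Chars.rstrip]

lemma rstrip_append_repl (u : List Char) (k : Nat) :
    PySem.Chars.rstrip (u ++ List.replicate k '\n') = PySem.Chars.rstrip u := by
  unfold PySem.Chars.rstrip
  rw [List.reverse_append, List.reverse_replicate,
    dropWhile_repl PySem.Chars.isspace (by decide) k u.reverse]

lemma rstrip_distrib (u v : List Char) (h : PySem.Chars.rstrip v ≠ []) :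
    PySem.Chars.rstrip (u ++ v) = u ++ PySem.Chars.rstrip v := by
  unfold PySem.Chars.rstrip at h ⊢
  have hne : List.dropWhile PySem.Chars.isspace v.reverse ≠ [] := by
    intro he; exact h (by rw [he]; rfl)
  rw [List.reverse_append, List.dropWhile_append,
    if_neg (by simpa [List.isEmpty_iff] using hne)]
  simp

lemma chain_noNL (x : List Char) (h : pvNoNL x) : List.IsChain pvR x := by
  induction x with
  | nil => simp
  | cons c t ih =>
    cases t with
    | nil => simp
    | cons d t' =>
      rw [List.isChain_cons_cons]
      constructor
      · intro _ hd
        rw [hd] at h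
        exact h (by simp)
      · exact ih (fun hm => h (List.mem_cons_of_mem _ hm))

lemma mem_of_getLast' (l : List Char) (a : Char) (h : l.getLast? = some a) : a ∈ l := by
  induction l with
  | nil => simp at h
  | cons c t ih =>
    cases t with
    | nil => simp at h; simp [h]
    | cons d t' =>
      rw [List.getLast?_cons_cons] at h
      exact List.mem_cons_of_mem _ (ih h)

lemma getLast?_noNL (x : List Char) (h : pvNoNL x) : x.getLast? ≠ some '\n' := by
  intro heq
  exact h (mem_of_getLast' x '\n' heq)

lemma getLast?_append_cons (u : List Char) (c : Char) (v : List Char) :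
    (u ++ c :: v).getLast? = (c :: v).getLast? := by
  induction u with
  | nil => simp
  | cons a u' ih =>
    cases u' with
    | nil => simp [List.getLast?_cons_cons]
    | cons b u'' =>
      rw [List.cons_append, List.cons_append, List.getLast?_cons_cons, ← List.cons_append]
      exact ih

lemma join_head (sep : List Char) (c : Char) (y' : List Char) (rest : List (List Char)) :
    ∃ w, PySem.Chars.join sep ((c :: y') :: rest) = c :: w := by
  cases rest with
  | nil => exact ⟨y', by rw [PySem.Chars.join_singleton]⟩
  | cons r rs => exact ⟨y' ++ sep ++ PySem.Chars.join sep (r :: rs),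
      by rw [PySem.Chars.join_cons_cons]; simp⟩

lemma good_JN (B : List (List Char)) (hB : B ≠ [])
    (h : ∀ l ∈ B, l ≠ [] ∧ pvNoNL l) :
    List.IsChain pvR (PySem.Chars.join ['\n'] B) ∧
      (PySem.Chars.join ['\n'] B).getLast? ≠ some '\n' := by
  induction B with
  | nil => exact absurd rfl hB
  | cons x B' ih =>
    obtain ⟨hxne, hxnl⟩ := h x (by simp)
    cases B' with
    | nil =>
      rw [PySem.Chars.join_singleton]
      exact ⟨chain_noNL x hxnl, getLast?_noNL x hxnl⟩
    | cons y B'' =>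
      obtain ⟨hch', hlast'⟩ := ih (by simp) (fun l hl => h l (by simp [hl]))
      obtain ⟨hyne, hynl⟩ := h y (by simp)
      obtain ⟨cy, y', rfl⟩ : ∃ cy y', y = cy :: y' := by
        cases y with
        | nil => exact absurd rfl hyne
        | cons cy y' => exact ⟨cy, y', rfl⟩
      obtain ⟨w, hw⟩ := join_head ['\n'] cy y' B''
      have hcy : cy ≠ '\n' := fun hc => hynl (hc ▸ List.mem_cons_self)
      rw [PySem.Chars.join_cons_cons, List.append_assoc, List.singleton_append]
      constructor
      · rw [List.isChain_append]
        refine ⟨chain_noNL x hxnl, ?_, ?_⟩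
        · rw [hw, List.isChain_cons_cons]
          refine ⟨fun _ => hcy, ?_⟩
          rw [← hw]; exact hch'
        · intro p hp q hq
          have hpx : p ∈ x := mem_of_getLast' x p hp
          exact fun hpn => absurd (hpn ▸ hpx) hxnl
      · rw [getLast?_append_cons, hw, List.getLast?_cons_cons, ← hw]
        exact hlast'

-- pvF recurrences

lemma pvF_nil : pvF [] = [] := by simp [pvF]

lemma pvF_cons_nil (t : List (List Char)) : pvF ([] :: t) = pvF t := by
  simp [pvF, pvStepB]

lemma foldl_stepB_gs (C : List (List Char)) : ∀ (gs : List (List (List Char))) (cur : List (List Char)),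
    C.foldl pvStepB (gs, cur)
      = (gs ++ (C.foldl pvStepB ([], cur)).1, (C.foldl pvStepB ([], cur)).2) := by
  induction C with
  | nil => intro gs cur; simp
  | cons l t ih =>
    intro gs cur
    rw [List.foldl_cons, List.foldl_cons]
    by_cases hl : l = []
    · subst hl
      by_cases hc : cur = []
      · subst hc
        rw [show pvStepB (gs, []) [] = (gs, []) from by simp [pvStepB],
          show pvStepB (([] : List (List (List Char))), []) [] = ([], []) from by simp [pvStepB]]
        exact ih gs []
      · rw [show pvStepB (gs, cur) [] = (gs ++ [cur], []) from by simp [pvStepB, hc],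
          show pvStepB (([] : List (List (List Char))), cur) [] = ([cur], []) from by
            simp [pvStepB, hc]]
        rw [ih (gs ++ [cur]) [], ih [cur] []]
        simp
    · rw [show pvStepB (gs, cur) l = (gs, cur ++ [l]) from by simp [pvStepB, hl],
        show pvStepB (([] : List (List (List Char))), cur) l = ([], cur ++ [l]) from by
          simp [pvStepB, hl]]
      exact ih gs (cur ++ [l])

lemma foldl_stepB_ne (a : List (List Char)) (ha : ∀ l ∈ a, l ≠ []) :
    ∀ (gs : List (List (List Char))) (cur : List (List Char)),
      a.foldl pvStepB (gs, cur) = (gs, cur ++ a) := by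
  induction a with
  | nil => intro gs cur; simp
  | cons l t ih =>
    intro gs cur
    rw [List.foldl_cons,
      show pvStepB (gs, cur) l = (gs, cur ++ [l]) from by simp [pvStepB, ha l (by simp)]]
    rw [ih (fun x hx => ha x (by simp [hx])) gs (cur ++ [l])]
    simp

lemma dropWhile_head_false {α : Type} (p : α → Bool) (t : List α) (y : α) (r' : List α)
    (h : t.dropWhile p = y :: r') : p y = false := by
  induction t with
  | nil => simp at h
  | cons a t' ih =>
    rw [List.dropWhile_cons] at h
    by_cases hp : p a = true
    · rw [if_pos hp] at h; exact ih h
    · rw [if_neg hp] at h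
      cases h
      simpa using hp

lemma pvF_cons (x : List Char) (t : List (List Char)) (hx : x ≠ []) :
    pvF (x :: t) = (x :: t.takeWhile (fun l => !l.isEmpty))
      :: pvF (t.dropWhile (fun l => !l.isEmpty)) := by
  have htt := List.takeWhile_append_dropWhile (p := fun l : List Char => !l.isEmpty) (l := t)
  unfold pvF
  rw [List.foldl_cons,
    show pvStepB ([], []) x = ([], [x]) from by simp [pvStepB, hx]]
  conv_lhs => rw [← htt]
  rw [List.foldl_append,
    foldl_stepB_ne _ (fun l hl => by
      have := List.mem_takeWhile_imp hl
      simpa [List.isEmpty_iff] using this) [] [x]]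
  simp only [List.singleton_append]
  cases hr : t.dropWhile (fun l => !l.isEmpty) with
  | nil =>
    simp
  | cons y r' =>
    have hy : y = [] := by
      have := dropWhile_head_false _ t y r' hr
      simpa [List.isEmpty_iff] using this
    subst hy
    rw [List.foldl_cons,
      show pvStepB ([], x :: t.takeWhile (fun l => !l.isEmpty)) [] =
          ([x :: t.takeWhile (fun l => !l.isEmpty)], []) from by simp [pvStepB]]
    rw [foldl_stepB_gs r' [x :: t.takeWhile (fun l => !l.isEmpty)] []]
    rw [show List.foldl pvStepB ([], []) (([] : List Char) :: r') = List.foldl pvStepB ([], []) r' from by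
      rw [List.foldl_cons, show pvStepB ([], []) ([] : List Char) = ([], []) from by
        simp [pvStepB]]]
    split_ifs with h1 <;> simp

lemma pvF_repl (e : Nat) (m' : List (List Char)) :
    pvF (List.replicate e ([] : List Char) ++ m') = pvF m' := by
  induction e with
  | zero => simp
  | succ e ih => rw [List.replicate_succ, List.cons_append, pvF_cons_nil, ih]

lemma pvF_good : ∀ (n : ℕ) (C : List (List Char)), C.length ≤ n →
    ∀ g ∈ pvF C, g ≠ [] ∧ ∀ y ∈ g, y ≠ [] := by
  intro n
  induction n with
  | zero =>
    intro C hC g hg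
    have : C = [] := List.eq_nil_of_length_eq_zero (Nat.le_zero.mp hC)
    subst this
    rw [pvF_nil] at hg
    simp at hg
  | succ n ih =>
    intro C hC g hg
    cases C with
    | nil => rw [pvF_nil] at hg; simp at hg
    | cons l t =>
      have htl : t.length ≤ n := by simpa using hC
      by_cases hl : l = []
      · subst hl
        rw [pvF_cons_nil] at hg
        exact ih t htl g hg
      · rw [pvF_cons l t hl] at hg
        rcases List.mem_cons.mp hg with rfl | hmem
        · refine ⟨by simp, ?_⟩
          intro y hy
          rcases List.mem_cons.mp hy with rfl | hy'
          · exact hl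
          · have := List.mem_takeWhile_imp hy'
            simpa [List.isEmpty_iff] using this
        · exact ih (t.dropWhile (fun l => !l.isEmpty))
            (le_trans (List.length_dropWhile_le _ _) htl) g hmem

lemma jn_repl (m : Nat) :
    PySem.Chars.join ['\n'] (List.replicate (m + 1) ([] : List Char))
      = List.replicate m '\n' := by
  induction m with
  | zero => rw [List.replicate_one, PySem.Chars.join_singleton]; rfl
  | succ m ih =>
    rw [List.replicate_succ]
    rw [show List.replicate (m + 1) ([] : List Char) = [] :: List.replicate m [] from
      List.replicate_succ]
    rw [PySem.Chars.join_cons_cons]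
    rw [show ([] :: List.replicate m ([] : List Char)) = List.replicate (m + 1) [] from
      List.replicate_succ.symm]
    rw [ih]
    simp [List.replicate_succ]

lemma jn_repl_prefix (e : Nat) (m' : List (List Char)) (h : m' ≠ []) :
    PySem.Chars.join ['\n'] (List.replicate e ([] : List Char) ++ m')
      = List.replicate e '\n' ++ PySem.Chars.join ['\n'] m' := by
  induction e with
  | zero => simp
  | succ e ih =>
    rw [List.replicate_succ, List.cons_append]
    obtain ⟨z, zs, hz⟩ : ∃ z zs, List.replicate e ([] : List Char) ++ m' = z :: zs := by
      cases he : List.replicate e ([] : List Char) ++ m' with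
      | nil =>
        exfalso
        cases m' with
        | nil => exact h rfl
        | cons a b => simp at he
      | cons z zs => exact ⟨z, zs, rfl⟩
    rw [hz, PySem.Chars.join_cons_cons, ← hz, ih]
    simp [List.replicate_succ]

lemma jnn_pvF_ne (m' : List (List Char)) (y : List Char) (m'' : List (List Char))
    (hm : m' = y :: m'') (hy : y ≠ []) :
    PySem.Chars.join ['\n', '\n'] ((pvF m').map (fun g => PySem.Chars.join ['\n'] g)) ≠ [] := by
  apply join_ne_nil
  · rw [hm, pvF_cons y m'' hy]; simp
  · intro l hl
    obtain ⟨g, hg, rfl⟩ := List.mem_map.mp hl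
    have hgood := pvF_good m'.length m' le_rfl g hg
    exact join_ne_nil _ _ hgood.1 hgood.2

lemma decomp_tail (s' : List (List Char)) (hs : ¬ ∀ x ∈ s', x = []) :
    ∃ e m' y m'', s' = List.replicate e ([] : List Char) ++ m' ∧ m' = y :: m'' ∧ y ≠ [] ∧
      e = (s'.takeWhile (fun x => x.isEmpty)).length ∧
      m' = s'.dropWhile (fun x => x.isEmpty) := by
  have htw : s'.takeWhile (fun x : List Char => x.isEmpty)
      = List.replicate (s'.takeWhile (fun x : List Char => x.isEmpty)).length ([] : List Char) :=
    List.eq_replicate_of_mem (fun b hb => by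
      have := List.mem_takeWhile_imp hb
      simpa [List.isEmpty_iff] using this)
  cases hd : s'.dropWhile (fun x : List Char => x.isEmpty) with
  | nil =>
    exfalso
    apply hs
    intro x hx
    have hall := List.dropWhile_eq_nil_iff.mp hd x hx
    simpa [List.isEmpty_iff] using hall
  | cons y m'' =>
    refine ⟨(s'.takeWhile (fun x : List Char => x.isEmpty)).length, y :: m'', y, m'', ?_, rfl, ?_, rfl, rfl⟩
    · rw [← htw, ← hd, List.takeWhile_append_dropWhile]
    · have := dropWhile_head_false _ s' y m'' hd
      simpa [List.isEmpty_iff] using this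

lemma bside_nil :
    PySem.Chars.strip (pvCollapseNN (PySem.Chars.join ['\n'] ([] : List (List Char))))
      = PySem.Chars.join ['\n', '\n'] ((pvF []).map (fun g => PySem.Chars.join ['\n'] g)) := by
  rw [PySem.Chars.join_nil, pvF_nil]
  simp [pvCollapseNN, pvCollapseRun, PySem.Chars.strip, PySem.Chars.lstrip,
    PySem.Chars.rstrip, PySem.Chars.join_nil]

-- B's core equals the "\n\n"-joined grouping of the cleaned lines
lemma bside : ∀ (n : ℕ) (C : List (List Char)), C.length ≤ n →
    (∀ l ∈ C, pvNoNL l ∧ pvClean l) →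
    PySem.Chars.strip (pvCollapseNN (PySem.Chars.join ['\n'] C))
      = PySem.Chars.join ['\n', '\n'] ((pvF C).map (fun g => PySem.Chars.join ['\n'] g)) := by
  intro n
  induction n with
  | zero =>
    intro C hC _
    have hC0 : C = [] := List.eq_nil_of_length_eq_zero (Nat.le_zero.mp hC)
    subst hC0
    exact bside_nil
  | succ n ih =>
    intro C hC hcl
    cases C with
    | nil => exact bside_nil
    | cons l t =>
      have htl : t.length ≤ n := by simpa using hC
      by_cases hl : l = []
      · subst hl
        rw [pvF_cons_nil]
        cases t with
        | nil =>
          rw [PySem.Chars.join_singleton, pvF_nil]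
          simp [pvCollapseNN, pvCollapseRun, PySem.Chars.strip, PySem.Chars.lstrip,
            PySem.Chars.rstrip, PySem.Chars.join_nil]
        | cons u t₂ =>
          rw [PySem.Chars.join_cons_cons]
          simp only [List.nil_append, List.singleton_append]
          by_cases hall : ∀ x ∈ (u :: t₂ : List (List Char)), x = []
          · have hrep : (u :: t₂ : List (List Char))
                = List.replicate (u :: t₂).length ([] : List Char) :=
              List.eq_replicate_of_mem hall
            rw [hrep, show ((u :: t₂ : List (List Char))).length = t₂.length + 1 from rfl,
              jn_repl t₂.length]
            rw [show ('\n' :: List.replicate t₂.length '\n')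
                = List.replicate (t₂.length + 1) '\n' from List.replicate_succ.symm]
            rw [show pvCollapseNN (List.replicate (t₂.length + 1) '\n')
                = List.replicate (min (t₂.length + 1) 2) '\n' from by
              rw [← List.append_nil (List.replicate (t₂.length + 1) '\n'),
                collapse_repl _ [] (Or.inl rfl)]
              simp [pvCollapseNN, pvCollapseRun]]
            rw [strip_repl]
            rw [show List.replicate (t₂.length + 1) ([] : List Char)
                = List.replicate (t₂.length + 1) ([] : List Char) ++ [] from by simp,
              pvF_repl, pvF_nil]
            simp [PySem.Chars.join_nil]
          · obtain ⟨e, m', y, m'', hs', hym, hyne, he, hm'd⟩ := decomp_tail (u :: t₂) hall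
            have hm'sub : ∀ x ∈ m', x ∈ (u :: t₂ : List (List Char)) := by
              intro x hx
              rw [hm'd] at hx
              exact (List.dropWhile_sublist _).subset hx
            obtain ⟨c, y₂, hy_eq⟩ : ∃ c y₂, y = c :: y₂ := by
              cases y with
              | nil => exact absurd rfl hyne
              | cons c y₂ => exact ⟨c, y₂, rfl⟩
            obtain ⟨w, hw0⟩ := join_head ['\n'] c y₂ m''
            have hw : PySem.Chars.join ['\n'] m' = c :: w := by rw [hym, hy_eq]; exact hw0
            have hyprops := hcl y (by
              apply List.mem_cons_of_mem
              exact hm'sub y (by rw [hym]; simp))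
            have hcne : c ≠ '\n' := fun hcc =>
              hyprops.1 (by rw [hy_eq, hcc] at *; exact List.mem_cons_self)
            rw [hs', jn_repl_prefix e m' (by rw [hym]; simp)]
            rw [show ('\n' :: (List.replicate e '\n' ++ PySem.Chars.join ['\n'] m'))
                = List.replicate (e + 1) '\n' ++ PySem.Chars.join ['\n'] m' from by
              simp [List.replicate_succ]]
            rw [collapse_repl (e + 1) _ (Or.inr ⟨c, w, hw, hcne⟩), strip_repl_prefix]
            have hlen : m'.length ≤ n := by
              have h1 : m'.length ≤ (u :: t₂ : List (List Char)).length := by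
                rw [hm'd]; exact List.length_dropWhile_le _ _
              omega
            rw [ih m' hlen (fun x hx => hcl x (List.mem_cons_of_mem _ (hm'sub x hx)))]
            rw [pvF_repl]
      · have hsplit : t = t.takeWhile (fun z : List Char => !z.isEmpty)
            ++ t.dropWhile (fun z : List Char => !z.isEmpty) :=
          (List.takeWhile_append_dropWhile).symm
        have haprops : ∀ x ∈ l :: t.takeWhile (fun z : List Char => !z.isEmpty),
            x ≠ [] ∧ pvNoNL x ∧ pvClean x := by
          intro x hx
          rcases List.mem_cons.mp hx with rfl | hx'
          · exact ⟨hl, (hcl x (by simp)).1, (hcl x (by simp)).2⟩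
          · have hxne : x ≠ [] := by
              have := List.mem_takeWhile_imp hx'
              simpa [List.isEmpty_iff] using this
            have hxt : x ∈ t := (List.takeWhile_sublist _).subset hx'
            exact ⟨hxne, (hcl x (List.mem_cons_of_mem _ hxt)).1,
              (hcl x (List.mem_cons_of_mem _ hxt)).2⟩
        have hJNBne : PySem.Chars.join ['\n'] (l :: t.takeWhile (fun z : List Char => !z.isEmpty)) ≠ [] :=
          join_ne_nil _ _ (by simp) (fun x hx => (haprops x hx).1)
        have hclB : pvClean (PySem.Chars.join ['\n'] (l :: t.takeWhile (fun z : List Char => !z.isEmpty))) :=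
          clean_join _ _ (fun x hx => ⟨(haprops x hx).1, (haprops x hx).2.2⟩)
        have hgood := good_JN (l :: t.takeWhile (fun z : List Char => !z.isEmpty)) (by simp)
          (fun x hx => ⟨(haprops x hx).1, (haprops x hx).2.1⟩)
        rw [pvF_cons l t hl]
        rw [show (l :: t : List (List Char))
            = (l :: t.takeWhile (fun z : List Char => !z.isEmpty))
              ++ t.dropWhile (fun z : List Char => !z.isEmpty) from by
          rw [List.cons_append, ← hsplit]]
        cases hrc : t.dropWhile (fun z : List Char => !z.isEmpty) with
        | nil =>
          rw [List.append_nil]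
          rw [show PySem.Chars.join ['\n'] (l :: t.takeWhile (fun z : List Char => !z.isEmpty))
              = PySem.Chars.join ['\n'] (l :: t.takeWhile (fun z : List Char => !z.isEmpty)) ++ []
              from by simp]
          rw [collapse_append _ [] hgood.1 hgood.2]
          rw [show pvCollapseNN [] = [] from rfl, List.append_nil]
          rw [clean_strip _ hclB]
          rw [pvF_nil, List.map_cons, List.map_nil, PySem.Chars.join_singleton]
        | cons y r' =>
          have hy : y = [] := by
            have := dropWhile_head_false _ t y r' hrc
            simpa [List.isEmpty_iff] using this
          subst hy
          rw [join_append ['\n'] _ ([] :: r') (by simp) (by simp)]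
          rw [List.append_assoc, List.singleton_append]
          by_cases hall : ∀ x ∈ ([] :: r' : List (List Char)), x = []
          · have hrep : (([] : List Char) :: r')
                = List.replicate ((([] : List Char) :: r')).length ([] : List Char) :=
              List.eq_replicate_of_mem hall
            rw [hrep, show ((([] : List Char) :: r')).length = r'.length + 1 from rfl,
              jn_repl r'.length]
            rw [show ('\n' :: List.replicate r'.length '\n')
                = List.replicate (r'.length + 1) '\n' ++ [] from by simp [List.replicate_succ]]
            rw [collapse_append _ _ hgood.1 hgood.2]
            rw [collapse_repl _ [] (Or.inl rfl)]
            rw [show pvCollapseNN [] = [] from rfl, List.append_nil]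
            have hstrip : PySem.Chars.strip (PySem.Chars.join ['\n'] (l :: t.takeWhile (fun z : List Char => !z.isEmpty))
                ++ List.replicate (min (r'.length + 1) 2) '\n')
                = PySem.Chars.join ['\n'] (l :: t.takeWhile (fun z : List Char => !z.isEmpty)) := by
              unfold PySem.Chars.strip
              rw [lstrip_append _ _ hJNBne hclB.1, rstrip_append_repl, hclB.2]
            rw [hstrip]
            rw [show List.replicate (r'.length + 1) ([] : List Char)
                = List.replicate (r'.length + 1) ([] : List Char) ++ [] from by simp,
              pvF_repl, pvF_nil, List.map_cons, List.map_nil, PySem.Chars.join_singleton]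
          · obtain ⟨e, m', y, m'', hs', hym, hyne, he, hm'd⟩ := decomp_tail ([] :: r') hall
            have he1 : 1 ≤ e := by
              rw [he, List.takeWhile_cons]
              simp
            have hm'sub : ∀ x ∈ m', x ∈ t := by
              intro x hx
              rw [hm'd] at hx
              have h1 : x ∈ (([] : List Char) :: r') := (List.dropWhile_sublist _).subset hx
              rw [← hrc] at h1
              exact (List.dropWhile_sublist _).subset h1
            obtain ⟨c, y₂, hy_eq⟩ : ∃ c y₂, y = c :: y₂ := by
              cases y with
              | nil => exact absurd rfl hyne
              | cons c y₂ => exact ⟨c, y₂, rfl⟩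
            obtain ⟨w, hw0⟩ := join_head ['\n'] c y₂ m''
            have hw : PySem.Chars.join ['\n'] m' = c :: w := by rw [hym, hy_eq]; exact hw0
            have hyprops := hcl y (List.mem_cons_of_mem _ (hm'sub y (by rw [hym]; simp)))
            have hcne : c ≠ '\n' := fun hcc =>
              hyprops.1 (by rw [hy_eq, hcc] at *; exact List.mem_cons_self)
            have hcsp : PySem.Chars.isspace c = false := by
              apply clean_head_not_space c y₂
              rw [← hy_eq]
              exact hyprops.2.1
            rw [hs', jn_repl_prefix e m' (by rw [hym]; simp)]
            rw [show ('\n' :: (List.replicate e '\n' ++ PySem.Chars.join ['\n'] m'))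
                = List.replicate (e + 1) '\n' ++ PySem.Chars.join ['\n'] m' from by
              simp [List.replicate_succ]]
            rw [collapse_append _ _ hgood.1 hgood.2]
            rw [collapse_repl (e + 1) _ (Or.inr ⟨c, w, hw, hcne⟩)]
            have hmin : min (e + 1) 2 = 2 := by omega
            rw [hmin]
            have hlen : m'.length ≤ n := by
              have h1 : m'.length ≤ (([] : List Char) :: r').length := by
                rw [hm'd]; exact List.length_dropWhile_le _ _
              have h2 : (([] : List Char) :: r').length ≤ t.length := by
                rw [← hrc]; exact List.length_dropWhile_le _ _
              omega
            have hV := ih m' hlen (fun x hx => hcl x (List.mem_cons_of_mem _ (hm'sub x hx)))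
            have hcw : pvCollapseNN (PySem.Chars.join ['\n'] m') = c :: pvCollapseRun 0 w := by
              rw [hw]; unfold pvCollapseNN; rw [run_ne 0 c w hcne]
            have hVne : PySem.Chars.join ['\n', '\n'] ((pvF m').map (fun g => PySem.Chars.join ['\n'] g)) ≠ [] :=
              jnn_pvF_ne m' y m'' hym hyne
            have hls : PySem.Chars.lstrip (pvCollapseNN (PySem.Chars.join ['\n'] m'))
                = pvCollapseNN (PySem.Chars.join ['\n'] m') := by
              rw [hcw]; exact lstrip_cons_ne c _ hcsp
            have hrs : PySem.Chars.rstrip (pvCollapseNN (PySem.Chars.join ['\n'] m'))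
                = PySem.Chars.join ['\n', '\n'] ((pvF m').map (fun g => PySem.Chars.join ['\n'] g)) := by
              rw [← hV]
              unfold PySem.Chars.strip
              rw [hls]
            unfold PySem.Chars.strip
            rw [lstrip_append _ _ hJNBne hclB.1]
            rw [show List.replicate 2 '\n' = ['\n', '\n'] from rfl]
            have hin : PySem.Chars.rstrip (['\n', '\n'] ++ pvCollapseNN (PySem.Chars.join ['\n'] m'))
                = ['\n', '\n'] ++ PySem.Chars.join ['\n', '\n'] ((pvF m').map (fun g => PySem.Chars.join ['\n'] g)) := by
              rw [rstrip_distrib _ _ (by rw [hrs]; exact hVne), hrs]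
            rw [rstrip_distrib _ _ (by rw [hin]; simp), hin]
            rw [pvF_repl, List.map_cons]
            obtain ⟨g0, gs0, hg0⟩ : ∃ g0 gs0,
                (pvF m').map (fun g => PySem.Chars.join ['\n'] g) = g0 :: gs0 := by
              rw [hym, pvF_cons y m'' hyne]
              exact ⟨_, _, by rw [List.map_cons]⟩
            rw [hg0, PySem.Chars.join_cons_cons]
            simp [List.append_assoc]

-- ===== VERDICT (by name: the statement is the Claim_ definition above) =====
theorem compact_multiline_spec : Claim_equal_compact_multiline := by
  intro text max_len _
  show _ = _
  unfold compact_multiline compact_multiline_alt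
  simp only [← pvCleanText_eq]
  have hcl : ∀ l ∈ (PySem.Chars.splitlines (if text.toList = [] then [] else text.toList)).map pvCleanText, pvClean l := by
    intro l hl
    obtain ⟨r, _, rfl⟩ := List.mem_map.mp hl
    exact clean_pvCleanText r
  have hA := main_eq ((PySem.Chars.splitlines (if text.toList = [] then [] else text.toList)).map pvCleanText) hcl
  have hB := bside ((PySem.Chars.splitlines (if text.toList = [] then [] else text.toList)).map pvCleanText).length
    ((PySem.Chars.splitlines (if text.toList = [] then [] else text.toList)).map pvCleanText) le_rfl
    (by
      intro l hl
      obtain ⟨r, _, rfl⟩ := List.mem_map.mp hl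
      exact ⟨noNL_pvCleanText r, clean_pvCleanText r⟩)
  rw [List.foldl_map] at hA
  rw [hA, hB]
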